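-- pv_equiv track=rewrite | github.com/irisetto/IntroducereInPython | Lab2/ex9.py | obstructed_seats
-- ===== SOURCE A (Python) =====
-- def obstructed_seats(matrix):
--     obstructed = []
--     rows = len(matrix)
--     cols = len(matrix[0])
--
--     for i in range(0,rows):
--         for j in range(0,cols):
--             height = matrix[i][j]
--             for k in range(i-1, 0, -1):
--                 if matrix[k][j] >= height:
--                     obstructed.append((i, j))
--                     break
--
--     return obstructed
-- ===== SOURCE B (Python) =====
-- def obstructed_seats(matrix):
--     # One pass: per-column running max over rows 1..i-1 (row 0 never blocks,
--     # matching the original's inner range(i-1, 0, -1)).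
--     obstructed = []
--     cols = len(matrix[0])
--     best = None  # per-column max over rows 1..i-1; None while that range is empty
--     for i, row in enumerate(matrix):
--         if best is not None:
--             for j in range(cols):
--                 if best[j] >= row[j]:
--                     obstructed.append((i, j))
--         if i >= 1:
--             if best is None:
--                 best = [row[j] for j in range(cols)]
--             else:
--                 best = [max(best[j], row[j]) for j in range(cols)]
--     return obstructed
-- ===== Notes on version B (the rewrite author's own statement) =====
-- stated objective: faster
-- what changed: Replaced the per-seat backward scan over all rows above with a single pass maintaining a per-column running maximum of rows 1..i-1, so each seat is decided in O(1).
import Mathlib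
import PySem

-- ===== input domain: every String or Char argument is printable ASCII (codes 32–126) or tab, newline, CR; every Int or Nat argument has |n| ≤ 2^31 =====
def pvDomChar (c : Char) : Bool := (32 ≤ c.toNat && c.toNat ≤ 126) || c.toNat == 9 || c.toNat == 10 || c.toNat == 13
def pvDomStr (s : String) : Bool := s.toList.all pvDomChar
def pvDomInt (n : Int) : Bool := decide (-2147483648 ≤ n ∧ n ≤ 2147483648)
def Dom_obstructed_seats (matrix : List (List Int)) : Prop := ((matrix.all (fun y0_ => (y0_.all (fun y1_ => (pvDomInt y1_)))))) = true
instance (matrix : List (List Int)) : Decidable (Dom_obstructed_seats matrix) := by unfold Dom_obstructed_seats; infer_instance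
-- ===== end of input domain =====

-- B replaces A's per-seat backward scan over all rows above by a single pass that
-- maintains a per-column running maximum of rows 1..i-1 (objective: faster, asymptotic).

-- ===== PORT A =====
def obstructed_seats (matrix : List (List Int)) : List (Int × Int) :=
  let rows : Int := (matrix.length : Int)
  let cols : Int := ((matrix.headD []).length : Int)
  (PySem.List.pyRange 0 rows 1).foldl (fun obstructed i =>
    (PySem.List.pyRange 0 cols 1).foldl (fun obstructed j =>
      let height := PySem.List.pyGetD (PySem.List.pyGetD matrix i []) j 0
      if (PySem.List.pyRange (i - 1) 0 (-1)).any
          (fun k => decide (height ≤ PySem.List.pyGetD (PySem.List.pyGetD matrix k []) j 0))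
      then obstructed ++ [(i, j)]
      else obstructed) obstructed) []

-- ===== PORT B =====
-- loop body of Source B's single pass (state: per-column running max of rows 1..i-1, output so far)
def pvStepB (cols : Int) (st : Option (List Int) × List (Int × Int)) (p : Int × List Int) :
    Option (List Int) × List (Int × Int) :=
  let i := p.1
  let row := p.2
  let obstructed :=
    match st.1 with
    | none => st.2
    | some b =>
      (PySem.List.pyRange 0 cols 1).foldl (fun acc j =>
        if PySem.List.pyGetD row j 0 ≤ PySem.List.pyGetD b j 0
        then acc ++ [(i, j)] else acc) st.2
  let best :=
    if 1 ≤ i then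
      some (match st.1 with
        | none => (PySem.List.pyRange 0 cols 1).map (fun j => PySem.List.pyGetD row j 0)
        | some b => (PySem.List.pyRange 0 cols 1).map
            (fun j => max (PySem.List.pyGetD b j 0) (PySem.List.pyGetD row j 0)))
    else st.1
  (best, obstructed)

def obstructed_seats_alt (matrix : List (List Int)) : List (Int × Int) :=
  let cols : Int := ((matrix.headD []).length : Int)
  ((PySem.List.enumerate matrix 0).foldl (pvStepB cols) (none, [])).2

-- ===== PRECONDITION & SPEC =====
-- Pre_ excludes exactly the inputs where Python A raises IndexError: the empty
-- matrix (len(matrix[0])) and matrices with a row shorter than the first row.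
def Pre_obstructed_seats (matrix : List (List Int)) : Prop :=
  matrix ≠ [] ∧ ∀ row ∈ matrix, (matrix.headD []).length ≤ row.length
instance (matrix : List (List Int)) : Decidable (Pre_obstructed_seats matrix) := by
  unfold Pre_obstructed_seats; infer_instance
def pvWitness_obstructed_seats : List (List Int) := [[1, 2], [3, 1], [2, 4]]

def Spec_obstructed_seats (matrix : List (List Int)) (out : List (Int × Int)) : Prop := out = obstructed_seats_alt matrix
instance (matrix : List (List Int)) (out : List (Int × Int)) : Decidable (Spec_obstructed_seats matrix out) := by unfold Spec_obstructed_seats; infer_instance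

-- ===== CLAIM (what is proved, stated in full; the proofs are below) =====
def Claim_equal_obstructed_seats : Prop := ∀ (matrix : List (List Int)), Dom_obstructed_seats matrix → Pre_obstructed_seats matrix → Spec_obstructed_seats matrix (obstructed_seats matrix)

-- ===== LEMMAS AND PROOFS =====

-- m[k][j] through Python's defaulted indexing
def pvGet (m : List (List Int)) (k j : Int) : Int :=
  PySem.List.pyGetD (PySem.List.pyGetD m k []) j 0

-- "seat (i,j) has a blocker in rows 1..i-1"
def pvCond (m : List (List Int)) (i j : Int) : Bool :=
  (PySem.List.pyRange 1 i 1).any (fun k => decide (pvGet m i j ≤ pvGet m k j))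

-- the obstructed seats contributed by row i, in column order
def pvRow (m : List (List Int)) (C i : Int) : List (Int × Int) :=
  ((PySem.List.pyRange 0 C 1).filter (fun j => pvCond m i j)).map (fun j => (i, j))

-- the invariant carried by B's running maximum
def pvInv (m : List (List Int)) (C : Int) (i : Int) (best : Option (List Int)) : Prop :=
  ∀ j : Int, 0 ≤ j → j < C → ∀ h : Int,
    (match best with
     | none => false
     | some b => decide (h ≤ PySem.List.pyGetD b j 0))
    = (PySem.List.pyRange 1 i 1).any (fun k => decide (h ≤ pvGet m k j))

lemma pvAnyRev (m : List (List Int)) (i j : Int) :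
    (PySem.List.pyRange (i - 1) 0 (-1)).any
        (fun k => decide (pvGet m i j ≤ pvGet m k j)) = pvCond m i j := by
  have h : (i - 1) + 1 = i := by ring
  rw [pvCond, PySem.List.pyRange_neg_one_eq_reverse, List.any_reverse]
  norm_num [h]

lemma pvA_eq (m : List (List Int)) :
    obstructed_seats m
      = (PySem.List.pyRange 0 (m.length : Int) 1).flatMap
          (pvRow m ((m.headD []).length : Int)) := by
  unfold obstructed_seats
  have h1 : ∀ (acc : List (Int × Int)) (i : Int),
      (PySem.List.pyRange 0 ((m.headD []).length : Int) 1).foldl (fun obstructed j =>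
        if (PySem.List.pyRange (i - 1) 0 (-1)).any
            (fun k => decide (PySem.List.pyGetD (PySem.List.pyGetD m i []) j 0
              ≤ PySem.List.pyGetD (PySem.List.pyGetD m k []) j 0))
        then obstructed ++ [(i, j)] else obstructed) acc
      = acc ++ pvRow m ((m.headD []).length : Int) i := by
    intro acc i
    rw [PySem.List.foldl_append_if]
    unfold pvRow
    congr 1
    exact congrArg _ (List.filter_congr (fun j _ => pvAnyRev m i j))
  simp only []
  rw [show (fun (obstructed : List (Int × Int)) (i : Int) =>
      (PySem.List.pyRange 0 ((m.headD []).length : Int) 1).foldl (fun obstructed j =>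
        if (PySem.List.pyRange (i - 1) 0 (-1)).any
            (fun k => decide (PySem.List.pyGetD (PySem.List.pyGetD m i []) j 0
              ≤ PySem.List.pyGetD (PySem.List.pyGetD m k []) j 0))
        then obstructed ++ [(i, j)] else obstructed) obstructed)
    = (fun acc i => acc ++ pvRow m ((m.headD []).length : Int) i) from
      funext fun acc => funext fun i => h1 acc i]
  rw [PySem.List.foldl_append_eq_flatMap]
  simp

lemma pvB_go (m : List (List Int)) (C : Int) :
    ∀ (rest : List (List Int)) (i : Nat) (best : Option (List Int)) (acc : List (Int × Int)),
      rest = m.drop i → pvInv m C i best →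
      ((PySem.List.enumerate rest (i : Int)).foldl (pvStepB C) (best, acc)).2
        = acc ++ (PySem.List.pyRange (i : Int) (m.length : Int) 1).flatMap (pvRow m C) := by
  intro rest
  induction rest with
  | nil =>
    intro i best acc hdrop _
    have hlen : m.length ≤ i := by
      have := List.drop_eq_nil_iff.mp hdrop.symm
      omega
    rw [PySem.List.enumerate_nil, PySem.List.pyRange_one_eq_nil (by exact_mod_cast hlen)]
    simp
  | cons row rest' ih =>
    intro i best acc hdrop hinv
    have hi : i < m.length := by
      by_contra hc
      rw [List.drop_eq_nil_of_le (by omega)] at hdrop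
      simp at hdrop
    have hrow : PySem.List.pyGetD m (i : Int) [] = row := by
      have h0 : m[i]? = some row := by
        have h := congrArg (fun (l : List (List Int)) => l[0]?) hdrop
        simp only [List.getElem?_drop] at h
        simpa using h.symm
      simp [PySem.List.pyGetD_natCast, List.getD, h0]
    have hdrop' : rest' = m.drop (i + 1) := by
      have h := congrArg (List.drop 1) hdrop
      simpa [List.drop_drop, Nat.add_comm] using h
    have hrange : PySem.List.pyRange (i : Int) (m.length : Int) 1
        = (i : Int) :: PySem.List.pyRange ((i : Int) + 1) (m.length : Int) 1 :=
      PySem.List.pyRange_one_cons (by exact_mod_cast hi)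
    -- the new invariant after this row
    have hinv' : pvInv m C (↑(i + 1)) ((pvStepB C (best, acc) ((i : Int), row)).1) := by
      intro j hj0 hjC h
      have hmem : 1 ≤ (i : Int) → ∀ (hh : Int),
          (PySem.List.pyRange 1 (↑(i + 1)) 1).any (fun k => decide (hh ≤ pvGet m k j))
          = ((PySem.List.pyRange 1 (i : Int) 1).any (fun k => decide (hh ≤ pvGet m k j))
             || decide (hh ≤ pvGet m (i : Int) j)) := by
        intro h1i hh
        rw [show ((i + 1 : Nat) : Int) = (i : Int) + 1 by push_cast; ring,
          PySem.List.pyRange_one_succ_right h1i, List.any_append]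
        simp
      unfold pvStepB
      simp only []
      by_cases h1i : 1 ≤ (i : Int)
      · rw [if_pos h1i]
        cases best with
        | none =>
          simp only []
          rw [PySem.List.pyGetD_map_pyRange_of_nonneg _ _ _ _ hj0 hjC, hmem h1i h,
            ← hinv j hj0 hjC h]
          simp [pvGet, hrow]
        | some b =>
          simp only []
          rw [PySem.List.pyGetD_map_pyRange_of_nonneg _ _ _ _ hj0 hjC, hmem h1i h,
            ← hinv j hj0 hjC h]
          have hmx : (h ≤ max (PySem.List.pyGetD b j 0) (PySem.List.pyGetD row j 0))
              ↔ (h ≤ PySem.List.pyGetD b j 0 ∨ h ≤ PySem.List.pyGetD row j 0) := le_max_iff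
          simp [hmx, pvGet, hrow]
      · rw [if_neg h1i]
        have hi0 : i = 0 := by omega
        subst hi0
        have hold := hinv j hj0 hjC h
        have e1 : PySem.List.pyRange 1 ((0 + 1 : Nat) : Int) 1 = [] :=
          PySem.List.pyRange_one_eq_nil (by norm_num)
        have e2 : PySem.List.pyRange 1 ((0 : Nat) : Int) 1 = [] :=
          PySem.List.pyRange_one_eq_nil (by norm_num)
        rw [e2] at hold
        rw [e1]
        exact hold
    -- the output appended for this row
    have hout : (pvStepB C (best, acc) ((i : Int), row)).2 = acc ++ pvRow m C (i : Int) := by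
      unfold pvStepB
      cases best with
      | none =>
        simp only []
        have : pvRow m C (i : Int) = [] := by
          unfold pvRow
          have : (PySem.List.pyRange 0 C 1).filter (fun j => pvCond m (i : Int) j) = [] := by
            rw [List.filter_eq_nil_iff]
            intro j hj
            have hj' := PySem.List.mem_pyRange_one.mp hj
            have := hinv j hj'.1 hj'.2 (pvGet m (i : Int) j)
            unfold pvCond
            simp only [] at this ⊢
            rw [← this]
            simp
          rw [this]; simp
        simp [this]
      | some b =>
        simp only []
        rw [PySem.List.foldl_append_ite]
        unfold pvRow
        congr 1
        congr 1
        apply List.filter_congr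
        intro j hj
        have hj' := PySem.List.mem_pyRange_one.mp hj
        have := hinv j hj'.1 hj'.2 (pvGet m (i : Int) j)
        unfold pvCond
        simp only [] at this ⊢
        rw [← this]
        simp [pvGet, hrow]
    rw [PySem.List.enumerate_cons, List.foldl_cons]
    have hst : pvStepB C (best, acc) ((i : Int), row)
        = ((pvStepB C (best, acc) ((i : Int), row)).1,
           acc ++ pvRow m C (i : Int)) := by
      rw [← hout]
    rw [hst,
      show (i : Int) + 1 = ((i + 1 : Nat) : Int) by push_cast; ring,
      ih (i + 1) _ _ hdrop' hinv', hrange]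
    simp

lemma pvB_eq (m : List (List Int)) :
    obstructed_seats_alt m
      = (PySem.List.pyRange 0 (m.length : Int) 1).flatMap
          (pvRow m ((m.headD []).length : Int)) := by
  unfold obstructed_seats_alt
  simp only []
  have h0 : (0 : Int) = ((0 : Nat) : Int) := by norm_num
  have hinv : pvInv m ((m.headD []).length : Int) ((0 : Nat) : Int) none := by
    intro j _ _ h
    rw [PySem.List.pyRange_one_eq_nil (by norm_num)]
    simp
  rw [h0, pvB_go m ((m.headD []).length : Int) m 0 none [] (by simp) hinv]
  simp

-- ===== VERDICT (by name: the statement is the Claim_ definition above) =====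
theorem obstructed_seats_spec : Claim_equal_obstructed_seats := by
  intro matrix _ _
  unfold Spec_obstructed_seats
  rw [pvA_eq, pvB_eq]
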